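-- pv_equiv track=rewrite | github.com/BertCalm/XO_OX-XOmnibus | Tools/xpn_pack_discovery_optimizer.py | audit_tags
-- ===== SOURCE A (Python) =====
-- GENRE_TAXONOMY = {
--     "hip-hop", "hip hop", "trap", "lo-fi", "lofi", "lo fi",
--     "r&b", "rnb", "soul", "funk", "jazz", "blues",
--     "electronic", "edm", "house", "techno", "drum and bass", "dnb",
--     "ambient", "cinematic", "orchestral", "classical",
--     "pop", "rock", "indie", "alternative",
--     "afrobeat", "latin", "reggae", "world",
--     "experimental", "industrial", "noise",
--     "gospel", "neo-soul", "boom bap",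
-- }
--
-- INSTRUMENT_TAGS = {
--     "synth", "synthesizer", "bass", "drums", "drum machine", "percussion",
--     "keys", "piano", "organ", "strings", "pads", "leads", "plucks",
--     "brass", "woodwind", "guitar", "harp", "bells", "marimba",
--     "808", "909", "rhodes", "moog", "fm", "wavetable", "granular",
--     "sampler", "acoustic", "electric",
-- }
--
-- MOOD_TAGS = {
--     "dark", "bright", "warm", "cold", "ethereal", "gritty", "smooth",
--     "aggressive", "mellow", "dreamy", "energetic", "melancholic",
--     "uplifting", "tense", "mysterious", "hypnotic", "raw", "lush",
--     "minimal", "dense", "sparse", "evolving", "static", "emotional",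
--     "cinematic", "atmospheric", "punchy", "airy", "heavy",
-- }
--
-- def audit_tags(data: dict) -> tuple[int, list[str]]:
--     """Factor 3: 5-15 tags including at least 1 genre, 1 instrument, 1 mood tag."""
--     tags_raw = data.get("tags", [])
--     issues = []
--
--     if not tags_raw:
--         return 0, ["No 'tags' field — add 5-15 tags covering genre, instrument type, and mood."]
--
--     tags = [str(t).lower().strip() for t in tags_raw]
--     count = len(tags)
--     points = 0
--
--     # Count range (40 pts)
--     if 5 <= count <= 15:
--         points += 40
--     elif count < 5:
--         points += 15
--         issues.append(f"Only {count} tag(s) — add more to reach 5-15 (genre, instrument, mood, technique, era).")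
--     else:
--         points += 25
--         issues.append(f"{count} tags is above the ideal 15 — excess tags can hurt relevance ranking.")
--
--     # Genre tag (20 pts)
--     has_genre_tag = any(g in tags or any(g in t for t in tags) for g in GENRE_TAXONOMY)
--     if has_genre_tag:
--         points += 20
--     else:
--         issues.append("No genre tag found — add one (e.g., 'hip-hop', 'ambient', 'electronic').")
--
--     # Instrument tag (20 pts)
--     has_instrument_tag = any(any(inst in t for inst in INSTRUMENT_TAGS) for t in tags)
--     if has_instrument_tag:
--         points += 20
--     else:
--         issues.append("No instrument type tag found — add one (e.g., 'synth', 'bass', 'pads').")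
--
--     # Mood tag (20 pts)
--     has_mood_tag = any(any(mood in t for mood in MOOD_TAGS) for t in tags)
--     if has_mood_tag:
--         points += 20
--     else:
--         issues.append("No mood tag found — add one (e.g., 'dark', 'warm', 'ethereal', 'gritty').")
--
--     return min(100, points), issues
-- ===== SOURCE B (Python) =====
-- GENRE_TAXONOMY = {
--     "hip-hop", "hip hop", "trap", "lo-fi", "lofi", "lo fi",
--     "r&b", "rnb", "soul", "funk", "jazz", "blues",
--     "electronic", "edm", "house", "techno", "drum and bass", "dnb",
--     "ambient", "cinematic", "orchestral", "classical",
--     "pop", "rock", "indie", "alternative",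
--     "afrobeat", "latin", "reggae", "world",
--     "experimental", "industrial", "noise",
--     "gospel", "neo-soul", "boom bap",
-- }
--
-- INSTRUMENT_TAGS = {
--     "synth", "synthesizer", "bass", "drums", "drum machine", "percussion",
--     "keys", "piano", "organ", "strings", "pads", "leads", "plucks",
--     "brass", "woodwind", "guitar", "harp", "bells", "marimba",
--     "808", "909", "rhodes", "moog", "fm", "wavetable", "granular",
--     "sampler", "acoustic", "electric",
-- }
--
-- MOOD_TAGS = {
--     "dark", "bright", "warm", "cold", "ethereal", "gritty", "smooth",
--     "aggressive", "mellow", "dreamy", "energetic", "melancholic",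
--     "uplifting", "tense", "mysterious", "hypnotic", "raw", "lush",
--     "minimal", "dense", "sparse", "evolving", "static", "emotional",
--     "cinematic", "atmospheric", "punchy", "airy", "heavy",
-- }
--
-- # One merged keyword table: every taxonomy term carries its category bit.
-- # (A's extra exact-membership test for genres is subsumed: a string is a
-- # substring of itself.)
-- _KEYWORD_BITS = (
--     [(term, 1) for term in GENRE_TAXONOMY]
--     + [(term, 2) for term in INSTRUMENT_TAGS]
--     + [(term, 4) for term in MOOD_TAGS]
-- )
--
-- _MISSING_MSGS = [
--     "No genre tag found — add one (e.g., 'hip-hop', 'ambient', 'electronic').",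
--     "No instrument type tag found — add one (e.g., 'synth', 'bass', 'pads').",
--     "No mood tag found — add one (e.g., 'dark', 'warm', 'ethereal', 'gritty').",
-- ]
--
--
-- def audit_tags(data: dict) -> tuple[int, list[str]]:
--     """Factor 3: 5-15 tags including at least 1 genre, 1 instrument, 1 mood tag."""
--     tags_raw = data.get("tags", [])
--     if not tags_raw:
--         return 0, ["No 'tags' field — add 5-15 tags covering genre, instrument type, and mood."]
--
--     tags = [str(t).lower().strip() for t in tags_raw]
--     count = len(tags)
--
--     # single pass over the tags: accumulate a 3-bit coverage mask
--     cover = 0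
--     for t in tags:
--         for term, bit in _KEYWORD_BITS:
--             if term in t:
--                 cover |= bit
--
--     if 5 <= count <= 15:
--         points, issues = 40, []
--     elif count < 5:
--         points, issues = 15, [f"Only {count} tag(s) — add more to reach 5-15 (genre, instrument, mood, technique, era)."]
--     else:
--         points, issues = 25, [f"{count} tags is above the ideal 15 — excess tags can hurt relevance ranking."]
--
--     flags = [(cover >> i) & 1 for i in range(3)]
--     points += 20 * sum(flags)
--     issues += [msg for f, msg in zip(flags, _MISSING_MSGS) if not f]
--     return min(100, points), issues
-- ===== Notes on version B (the rewrite author's own statement) =====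
-- stated objective: alternative
-- what changed: B merges the three taxonomies into one keyword->category-bit table, computes a 3-bit coverage mask in a single pass over the tags, then derives the score arithmetically (20 * number of set bits) and the issue list by filtering the missing bits, instead of A's three separate staged any-scans with per-category branches.
import Mathlib
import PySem

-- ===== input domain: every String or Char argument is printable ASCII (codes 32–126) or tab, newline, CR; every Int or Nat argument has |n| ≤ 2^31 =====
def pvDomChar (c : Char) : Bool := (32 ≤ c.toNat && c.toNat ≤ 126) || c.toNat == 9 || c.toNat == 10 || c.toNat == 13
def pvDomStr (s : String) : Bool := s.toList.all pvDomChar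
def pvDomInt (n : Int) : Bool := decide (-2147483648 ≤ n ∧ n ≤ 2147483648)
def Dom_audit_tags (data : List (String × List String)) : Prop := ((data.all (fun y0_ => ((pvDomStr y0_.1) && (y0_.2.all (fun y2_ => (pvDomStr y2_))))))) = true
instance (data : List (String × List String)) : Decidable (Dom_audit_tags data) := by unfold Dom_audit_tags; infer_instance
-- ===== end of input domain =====

-- B computes one 3-bit coverage mask in a single pass over a merged keyword→bit table and
-- derives score and issues from the mask, instead of A's three staged coverage scans
-- (objective: alternative); return values are identical.

-- shared data tables (the module-level constant sets, in source order)
def GENRE_TAXONOMY : List String := [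
  "hip-hop", "hip hop", "trap", "lo-fi", "lofi", "lo fi",
  "r&b", "rnb", "soul", "funk", "jazz", "blues",
  "electronic", "edm", "house", "techno", "drum and bass", "dnb",
  "ambient", "cinematic", "orchestral", "classical",
  "pop", "rock", "indie", "alternative",
  "afrobeat", "latin", "reggae", "world",
  "experimental", "industrial", "noise",
  "gospel", "neo-soul", "boom bap"]

def INSTRUMENT_TAGS : List String := [
  "synth", "synthesizer", "bass", "drums", "drum machine", "percussion",
  "keys", "piano", "organ", "strings", "pads", "leads", "plucks",
  "brass", "woodwind", "guitar", "harp", "bells", "marimba",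
  "808", "909", "rhodes", "moog", "fm", "wavetable", "granular",
  "sampler", "acoustic", "electric"]

def MOOD_TAGS : List String := [
  "dark", "bright", "warm", "cold", "ethereal", "gritty", "smooth",
  "aggressive", "mellow", "dreamy", "energetic", "melancholic",
  "uplifting", "tense", "mysterious", "hypnotic", "raw", "lush",
  "minimal", "dense", "sparse", "evolving", "static", "emotional",
  "cinematic", "atmospheric", "punchy", "airy", "heavy"]

-- ===== PORT A =====
def audit_tags (data : List (String × List String)) : Int × List String :=
  let tags_raw := PySem.Dict.getD (PySem.Dict.mk data) "tags" []
  let issues : List String := []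
  if tags_raw = [] then
    (0, ["No 'tags' field — add 5-15 tags covering genre, instrument type, and mood."])
  else
    let tags := tags_raw.map (fun t => PySem.Str.strip (PySem.Str.lower t))
    let count : Nat := tags.length
    let points : Int := 0
    -- Count range (40 pts)
    let (points, issues) :=
      if 5 ≤ count ∧ count ≤ 15 then (points + 40, issues)
      else if count < 5 then
        (points + 15, issues ++ ["Only " ++ PySem.Int.toStr (count : Int) ++ " tag(s) — add more to reach 5-15 (genre, instrument, mood, technique, era)."])
      else
        (points + 25, issues ++ [PySem.Int.toStr (count : Int) ++ " tags is above the ideal 15 — excess tags can hurt relevance ranking."])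
    -- Genre tag (20 pts)
    let has_genre_tag := GENRE_TAXONOMY.any (fun g => tags.contains g || tags.any (fun t => PySem.Str.isIn g t))
    let (points, issues) :=
      if has_genre_tag then (points + 20, issues)
      else (points, issues ++ ["No genre tag found — add one (e.g., 'hip-hop', 'ambient', 'electronic')."])
    -- Instrument tag (20 pts)
    let has_instrument_tag := tags.any (fun t => INSTRUMENT_TAGS.any (fun inst => PySem.Str.isIn inst t))
    let (points, issues) :=
      if has_instrument_tag then (points + 20, issues)
      else (points, issues ++ ["No instrument type tag found — add one (e.g., 'synth', 'bass', 'pads')."])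
    -- Mood tag (20 pts)
    let has_mood_tag := tags.any (fun t => MOOD_TAGS.any (fun mood => PySem.Str.isIn mood t))
    let (points, issues) :=
      if has_mood_tag then (points + 20, issues)
      else (points, issues ++ ["No mood tag found — add one (e.g., 'dark', 'warm', 'ethereal', 'gritty')."])
    (min 100 points, issues)

-- ===== PORT B =====
-- merged keyword table: each taxonomy term carries its category bit (genre 1, instrument 2, mood 4)
def pvKeywordBits : List (String × Nat) :=
  GENRE_TAXONOMY.map (fun term => (term, 1))
    ++ INSTRUMENT_TAGS.map (fun term => (term, 2))
    ++ MOOD_TAGS.map (fun term => (term, 4))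

def pvMissingMsgs : List String := [
  "No genre tag found — add one (e.g., 'hip-hop', 'ambient', 'electronic').",
  "No instrument type tag found — add one (e.g., 'synth', 'bass', 'pads').",
  "No mood tag found — add one (e.g., 'dark', 'warm', 'ethereal', 'gritty')."]

def audit_tags_alt (data : List (String × List String)) : Int × List String :=
  let tags_raw := PySem.Dict.getD (PySem.Dict.mk data) "tags" []
  if tags_raw = [] then
    (0, ["No 'tags' field — add 5-15 tags covering genre, instrument type, and mood."])
  else
    let tags := tags_raw.map (fun t => PySem.Str.strip (PySem.Str.lower t))
    let count : Nat := tags.length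
    -- single pass over the tags: accumulate a 3-bit coverage mask
    let cover : Nat := tags.foldl
      (fun c t => pvKeywordBits.foldl
        (fun c tb => if PySem.Str.isIn tb.1 t then c ||| tb.2 else c) c) 0
    let (points, issues) : Int × List String :=
      if 5 ≤ count ∧ count ≤ 15 then (40, [])
      else if count < 5 then
        (15, ["Only " ++ PySem.Int.toStr (count : Int) ++ " tag(s) — add more to reach 5-15 (genre, instrument, mood, technique, era)."])
      else
        (25, [PySem.Int.toStr (count : Int) ++ " tags is above the ideal 15 — excess tags can hurt relevance ranking."])
    let flags : List Nat := (List.range 3).map (fun i => (cover >>> i) &&& 1)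
    let points := points + 20 * (flags.sum : Int)
    let issues := issues ++ (flags.zip pvMissingMsgs).filterMap
      (fun p => if p.1 = 0 then some p.2 else none)
    (min 100 points, issues)

-- ===== PRECONDITION & SPEC =====
def Spec_audit_tags (data : List (String × List String)) (out : Int × List String) : Prop := out = audit_tags_alt data
instance (data : List (String × List String)) (out : Int × List String) : Decidable (Spec_audit_tags data out) := by unfold Spec_audit_tags; infer_instance

-- ===== CLAIM (what is proved, stated in full; the proofs are below) =====
def Claim_equal_audit_tags : Prop := ∀ (data : List (String × List String)), Dom_audit_tags data → Spec_audit_tags data (audit_tags data)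

-- ===== LEMMAS AND PROOFS =====

-- A's genre check also tests exact list membership; that is subsumed by the substring
-- scan (every string is a substring of itself), and the two `any` orders agree.
lemma genre_check_eq (L tags : List String) :
    L.any (fun g => tags.contains g || tags.any (fun t => PySem.Str.isIn g t))
      = tags.any (fun t => L.any (fun g => PySem.Str.isIn g t)) := by
  rw [Bool.eq_iff_iff]
  simp only [List.any_eq_true, Bool.or_eq_true, List.contains_eq_mem, decide_eq_true_eq]
  constructor
  · rintro ⟨g, hg, hmem | ⟨t, ht, hi⟩⟩
    · exact ⟨g, hmem, g, hg, (by rw [PySem.Str.isIn_iff_infix])⟩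
    · exact ⟨t, ht, g, hg, hi⟩
  · rintro ⟨t, ht, g, hg, hi⟩
    exact ⟨g, hg, Or.inr ⟨t, ht, hi⟩⟩

-- bit i of the inner (keyword-table) fold
lemma inner_testBit (t : String) (L : List (String × Nat)) (c : Nat) (i : Nat) :
    (L.foldl (fun c tb => if PySem.Str.isIn tb.1 t then c ||| tb.2 else c) c).testBit i
      = (c.testBit i || L.any (fun tb => PySem.Str.isIn tb.1 t && tb.2.testBit i)) := by
  induction L generalizing c with
  | nil => simp
  | cons hd tl ih =>
      simp only [List.foldl_cons, List.any_cons, ih]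
      rcases Bool.eq_false_or_eq_true (PySem.Str.isIn hd.1 t) with h | h <;>
        simp only [h] <;> simp [Nat.testBit_or] <;> rw [Bool.or_assoc]

-- bit i of the coverage mask
lemma cover_testBit (tags : List String) (L : List (String × Nat)) (c : Nat) (i : Nat) :
    (tags.foldl (fun c t => L.foldl
        (fun c tb => if PySem.Str.isIn tb.1 t then c ||| tb.2 else c) c) c).testBit i
      = (c.testBit i || tags.any (fun t => L.any (fun tb => PySem.Str.isIn tb.1 t && tb.2.testBit i))) := by
  induction tags generalizing c with
  | nil => simp
  | cons hd tl ih =>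
      simp only [List.foldl_cons, List.any_cons, ih, inner_testBit, Bool.or_assoc]

lemma shift_and_one (x i : Nat) : (x >>> i) &&& 1 = if x.testBit i then 1 else 0 := by
  rw [Nat.and_one_is_mod, Nat.testBit_eq_decide_div_mod_eq, Nat.shiftRight_eq_div_pow]
  rcases Nat.mod_two_eq_zero_or_one (x / 2 ^ i) with h | h <;> simp [h]

lemma any_false (L : List String) : (L.any fun _ => false) = false := by
  induction L <;> simp_all

-- the merged table restricted to one bit is exactly one taxonomy scan
lemma bits_any_0 (t : String) :
    pvKeywordBits.any (fun tb => PySem.Str.isIn tb.1 t && tb.2.testBit 0)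
      = GENRE_TAXONOMY.any (fun g => PySem.Str.isIn g t) := by
  simp [pvKeywordBits, List.any_append, List.any_map, Function.comp_def, any_false,
    show Nat.testBit 1 0 = true from rfl, show Nat.testBit 2 0 = false from rfl,
    show Nat.testBit 4 0 = false from rfl]

lemma bits_any_1 (t : String) :
    pvKeywordBits.any (fun tb => PySem.Str.isIn tb.1 t && tb.2.testBit 1)
      = INSTRUMENT_TAGS.any (fun g => PySem.Str.isIn g t) := by
  simp [pvKeywordBits, List.any_append, List.any_map, Function.comp_def, any_false,
    show Nat.testBit 1 1 = false from rfl, show Nat.testBit 2 1 = true from rfl,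
    show Nat.testBit 4 1 = false from rfl]

lemma bits_any_2 (t : String) :
    pvKeywordBits.any (fun tb => PySem.Str.isIn tb.1 t && tb.2.testBit 2)
      = MOOD_TAGS.any (fun g => PySem.Str.isIn g t) := by
  simp [pvKeywordBits, List.any_append, List.any_map, Function.comp_def, any_false,
    show Nat.testBit 1 2 = false from rfl, show Nat.testBit 2 2 = false from rfl,
    show Nat.testBit 4 2 = true from rfl]

-- ===== VERDICT (by name: the statement is the Claim_ definition above) =====
set_option maxHeartbeats 2000000 in
theorem audit_tags_spec : Claim_equal_audit_tags := by
  intro data _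
  unfold Spec_audit_tags audit_tags audit_tags_alt
  by_cases h : PySem.Dict.getD (PySem.Dict.mk data) "tags" ([] : List String) = []
  · simp only [h, if_pos]
  · simp only [if_neg h]
    set tags := (PySem.Dict.getD (PySem.Dict.mk data) "tags" ([] : List String)).map
      (fun t => PySem.Str.strip (PySem.Str.lower t)) with htags
    simp only [List.range_succ, List.range_zero, List.map, List.nil_append,
      List.cons_append, List.zip, List.zipWith, List.filterMap, List.sum_cons,
      List.sum_nil, pvMissingMsgs, shift_and_one, cover_testBit, Nat.zero_testBit,
      Bool.false_or, genre_check_eq, bits_any_0, bits_any_1, bits_any_2]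
    rcases Bool.eq_false_or_eq_true (tags.any fun t => GENRE_TAXONOMY.any fun g => PySem.Str.isIn g t) with hG | hG <;>
    rcases Bool.eq_false_or_eq_true (tags.any fun t => INSTRUMENT_TAGS.any fun inst => PySem.Str.isIn inst t) with hI | hI <;>
    rcases Bool.eq_false_or_eq_true (tags.any fun t => MOOD_TAGS.any fun mood => PySem.Str.isIn mood t) with hM | hM <;>
      simp only [hG, hI, hM] <;> split_ifs <;>
      first
        | contradiction
        | (simp only [Prod.mk.injEq, List.cons_append, List.nil_append, List.append_nil,
             List.sum_cons, List.sum_nil]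
           try norm_num)
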